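-- pv_equiv track=rewrite | github.com/DannyDeGaspari/Samsung-HVAC-buscontrol | lib_serial.py | compose_msg
-- ===== SOURCE A (Python) =====
-- PROTOCOL_START = '\x32'
--
-- PROTOCOL_END = '\x34'
--
-- def compose_msg(msg):
--   serline = [ord(PROTOCOL_START)]
--   chksum = 0
--   for x in msg:
--     serline.append(x)
--     chksum = chksum ^ x   # xor
--   serline.append(chksum)
--   serline.append(ord(PROTOCOL_END))
--   return serline
-- ===== SOURCE B (Python) =====
-- PROTOCOL_START = '\x32'
-- PROTOCOL_END = '\x34'
--
-- def _xor(data):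
--   # divide-and-conquer tree reduction of the XOR checksum
--   if not data:
--     return 0
--   if len(data) == 1:
--     return data[0]
--   mid = len(data) // 2
--   return _xor(data[:mid]) ^ _xor(data[mid:])
--
-- def compose_msg(msg):
--   data = list(msg)
--   return [ord(PROTOCOL_START)] + data + [_xor(data), ord(PROTOCOL_END)]
-- ===== Notes on version B (the rewrite author's own statement) =====
-- stated objective: alternative
-- what changed: The XOR checksum is computed by a recursive divide-and-conquer tree reduction over halves of the payload (correct because XOR is associative with identity 0) instead of a sequential copy-and-accumulate loop, and the frame is assembled by list concatenation.
import Mathlib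
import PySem

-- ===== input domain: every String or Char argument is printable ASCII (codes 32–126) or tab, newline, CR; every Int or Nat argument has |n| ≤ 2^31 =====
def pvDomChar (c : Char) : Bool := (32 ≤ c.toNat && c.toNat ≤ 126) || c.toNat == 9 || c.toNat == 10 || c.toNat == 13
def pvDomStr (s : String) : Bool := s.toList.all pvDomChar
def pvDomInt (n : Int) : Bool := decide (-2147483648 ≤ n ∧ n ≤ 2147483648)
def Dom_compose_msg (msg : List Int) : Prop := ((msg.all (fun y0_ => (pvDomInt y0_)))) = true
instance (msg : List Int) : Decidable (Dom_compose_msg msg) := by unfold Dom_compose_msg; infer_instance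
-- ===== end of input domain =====

-- B computes the checksum by a divide-and-conquer tree reduction (XOR is associative with identity 0) and assembles the frame by concatenation; same result, different algorithm.

-- ===== PORT A =====
-- A: one fused loop appending each byte and accumulating the xor checksum.
def compose_msg (msg : List Int) : List Int :=
  let st := msg.foldl (fun (st : List Int × Int) x => (st.1 ++ [x], PySem.Int.bxor st.2 x)) ([50], 0)
  st.1 ++ [st.2, 52]

-- ===== PORT B =====
-- B helper _xor: divide-and-conquer XOR. data[:mid] / data[mid:] with 0 ≤ mid ≤ len are
-- exactly List.take mid / List.drop mid, and len(data)//2 on a Nat length is Nat division.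
def pyXorDC : List Int → Int
  | [] => 0
  | [x] => x
  | x :: y :: rest =>
      -- mid = len(data)//2; data[:mid] ^ -combined with- data[mid:]
      PySem.Int.bxor (pyXorDC ((x :: y :: rest).take ((x :: y :: rest).length / 2)))
                     (pyXorDC ((x :: y :: rest).drop ((x :: y :: rest).length / 2)))
termination_by data => data.length
decreasing_by all_goals simp_all; omega

-- B: materialize, tree-reduce the checksum, concatenate the frame.
def compose_msg_alt (msg : List Int) : List Int :=
  [50] ++ msg ++ [pyXorDC msg, 52]

-- ===== PRECONDITION & SPEC =====
def Spec_compose_msg (msg : List Int) (out : List Int) : Prop := out = compose_msg_alt msg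
instance (msg : List Int) (out : List Int) : Decidable (Spec_compose_msg msg out) := by unfold Spec_compose_msg; infer_instance

-- ===== CLAIM (what is proved, stated in full; the proofs are below) =====
def Claim_equal_compose_msg : Prop := ∀ (msg : List Int), Dom_compose_msg msg → Spec_compose_msg msg (compose_msg msg)

-- ===== LEMMAS AND PROOFS =====
-- encoding of Python ints as (magnitude, sign) for the associativity proof
def pvMag (a : Int) : Nat := if 0 ≤ a then a.toNat else (-a-1).toNat
def pvNeg (a : Int) : Bool := decide (a < 0)
def pvDec (n : Nat) (s : Bool) : Int := if s then -(n:Int)-1 else n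

theorem bxor_enc (a b : Int) :
    PySem.Int.bxor a b = pvDec (pvMag a ^^^ pvMag b) (pvNeg a != pvNeg b) := by
  unfold PySem.Int.bxor pvMag pvNeg pvDec
  split_ifs with h1 h2 h2' <;> simp_all <;> omega

theorem mag_dec (n : Nat) (s : Bool) : pvMag (pvDec n s) = n := by
  cases s <;> simp [pvMag, pvDec] <;> omega

theorem neg_dec (n : Nat) (s : Bool) : pvNeg (pvDec n s) = s := by
  cases s <;> simp [pvNeg, pvDec] <;> omega

theorem bxor_assoc' (a b c : Int) :
    PySem.Int.bxor (PySem.Int.bxor a b) c = PySem.Int.bxor a (PySem.Int.bxor b c) := by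
  simp only [bxor_enc, mag_dec, neg_dec]
  rw [Nat.xor_assoc]
  cases pvNeg a <;> cases pvNeg b <;> cases pvNeg c <;> rfl

theorem zero_bxor (a : Int) : PySem.Int.bxor 0 a = a := by
  rw [PySem.Int.bxor_comm, PySem.Int.bxor_zero]

theorem foldl_bxor_shift (xs : List Int) (c : Int) :
    xs.foldl PySem.Int.bxor c = PySem.Int.bxor c (xs.foldl PySem.Int.bxor 0) := by
  induction xs generalizing c with
  | nil => simp
  | cons x xs ih =>
    simp only [List.foldl_cons]
    rw [ih (PySem.Int.bxor c x), ih (PySem.Int.bxor 0 x), zero_bxor, bxor_assoc']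

theorem foldl_bxor_append (a b : List Int) :
    (a ++ b).foldl PySem.Int.bxor 0
      = PySem.Int.bxor (a.foldl PySem.Int.bxor 0) (b.foldl PySem.Int.bxor 0) := by
  rw [List.foldl_append, foldl_bxor_shift]

theorem pyXorDC_eq_foldl (xs : List Int) : pyXorDC xs = xs.foldl PySem.Int.bxor 0 := by
  induction xs using pyXorDC.induct with
  | case1 => simp [pyXorDC]
  | case2 x => simp [pyXorDC, zero_bxor]
  | case3 x y rest ih1 ih2 =>
    rw [pyXorDC, ih1, ih2, ← foldl_bxor_append, List.take_append_drop]

theorem compose_msg_fold_split (msg : List Int) (acc : List Int) (c : Int) :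
    msg.foldl (fun (st : List Int × Int) x => (st.1 ++ [x], PySem.Int.bxor st.2 x)) (acc, c)
      = (acc ++ msg, msg.foldl PySem.Int.bxor c) := by
  induction msg generalizing acc c with
  | nil => simp
  | cons x xs ih => simp [List.foldl, ih]

-- ===== VERDICT (by name: the statement is the Claim_ definition above) =====
theorem compose_msg_spec : Claim_equal_compose_msg := by
  intro msg _
  show _ = _
  simp [compose_msg, compose_msg_alt, compose_msg_fold_split, pyXorDC_eq_foldl]
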